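-- pv_equiv track=rewrite | github.com/Chenwei-1999/Sparse_Video_Understanding | examples/revise/plug_and_play_nextqa_vllm.py | _unseen_intervals
-- ===== SOURCE A (Python) =====
-- def _unseen_intervals(frame_count: int, seen_frames: list[int]) -> list[tuple[int, int]]:
--     """Return unseen frame ranges as inclusive [start, end] intervals."""
--     if frame_count <= 0:
--         return []
--     seen = sorted({int(i) for i in (seen_frames or []) if 0 <= int(i) < frame_count})
--     anchors = [-1, *seen, frame_count]
--     intervals: list[tuple[int, int]] = []
--     for a, b in zip(anchors, anchors[1:], strict=False):
--         start = a + 1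
--         end = b - 1
--         if start <= end:
--             intervals.append((start, end))
--     return intervals
-- ===== SOURCE B (Python) =====
-- def _unseen_intervals(frame_count: int, seen_frames: list[int]) -> list[tuple[int, int]]:
--     """Return unseen frame ranges as inclusive [start, end] intervals."""
--     if frame_count <= 0:
--         return []
--     seen = sorted({int(i) for i in (seen_frames or []) if 0 <= int(i) < frame_count})
--     # phase 1: merge consecutive seen frames into maximal seen blocks
--     blocks = []
--     i, n = 0, len(seen)
--     while i < n:
--         j = i
--         while j + 1 < n and seen[j + 1] == seen[j] + 1:
--             j += 1
--         blocks.append((seen[i], seen[j]))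
--         i = j + 1
--     # phase 2: emit the complement of the seen blocks within [0, frame_count - 1]
--     intervals = []
--     cursor = 0
--     for a, b in blocks:
--         if cursor <= a - 1:
--             intervals.append((cursor, a - 1))
--         cursor = b + 1
--     if cursor <= frame_count - 1:
--         intervals.append((cursor, frame_count - 1))
--     return intervals
-- ===== Notes on version B (the rewrite author's own statement) =====
-- stated objective: alternative
-- what changed: B merges the sorted seen frames into maximal consecutive seen blocks in one pass and then emits the complement of those blocks within [0, frame_count-1] in a second pass with a cursor, instead of A's single walk over adjacent pairs of the anchor list [-1]+seen+[frame_count].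
import Mathlib
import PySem

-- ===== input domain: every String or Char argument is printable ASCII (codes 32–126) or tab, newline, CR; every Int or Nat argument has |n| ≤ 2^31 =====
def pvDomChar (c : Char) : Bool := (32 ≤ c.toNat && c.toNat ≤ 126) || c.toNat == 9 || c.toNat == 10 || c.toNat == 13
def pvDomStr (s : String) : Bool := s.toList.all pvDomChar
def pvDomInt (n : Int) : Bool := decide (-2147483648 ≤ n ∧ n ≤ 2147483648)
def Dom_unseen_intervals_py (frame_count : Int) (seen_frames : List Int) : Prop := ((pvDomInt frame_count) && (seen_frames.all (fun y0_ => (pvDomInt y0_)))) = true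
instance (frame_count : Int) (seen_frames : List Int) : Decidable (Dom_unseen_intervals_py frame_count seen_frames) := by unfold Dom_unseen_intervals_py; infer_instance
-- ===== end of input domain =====

-- B replaces A's walk over adjacent anchor pairs by two passes: merge the sorted seen
-- frames into maximal consecutive blocks, then emit the complement of the blocks
-- within [0, frame_count-1] (alternative algorithm, not faster).

-- ===== PORT A =====
-- loop body of A's 'for a, b in zip(anchors, anchors[1:])'
def pvAstep (acc : List (Int × Int)) (ab : Int × Int) : List (Int × Int) :=
  let start := ab.1 + 1
  let «end» := ab.2 - 1
  if start ≤ «end» then acc ++ [(start, «end»)] else acc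

def unseen_intervals_py (frame_count : Int) (seen_frames : List Int) : List (Int × Int) :=
  if frame_count ≤ 0 then []
  else
    let seen := PySem.List.sorted
      (PySem.Set.ofList (seen_frames.filter (fun i => decide (0 ≤ i) && decide (i < frame_count))))
      (fun x => x) false
    let anchors := -1 :: (seen ++ [frame_count])
    (anchors.zip anchors.tail).foldl pvAstep []

-- ===== PORT B =====
-- inner while of phase 1: advance j while the next seen frame is consecutive;
-- returns (seen[j], remaining suffix after j)
def pvRunEnd (cur : Int) (xs : List Int) : Int × List Int :=
  match xs with
  | [] => (cur, [])
  | y :: ys => if y = cur + 1 then pvRunEnd y ys else (cur, y :: ys)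

theorem pvRunEnd_length (cur : Int) (xs : List Int) : (pvRunEnd cur xs).2.length ≤ xs.length := by
  induction xs generalizing cur with
  | nil => simp [pvRunEnd]
  | cons y ys ih =>
    simp only [pvRunEnd]
    split
    · exact Nat.le_succ_of_le (ih y)
    · simp

-- outer while of phase 1
def pvMergeRuns : List Int → List (Int × Int)
  | [] => []
  | x :: xs => (x, (pvRunEnd x xs).1) :: pvMergeRuns (pvRunEnd x xs).2
termination_by l => l.length
decreasing_by simpa [Nat.lt_succ_iff] using pvRunEnd_length x xs

-- loop body of phase 2; state = (intervals, cursor)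
def pvCstep (s : List (Int × Int) × Int) (ab : Int × Int) : List (Int × Int) × Int :=
  ((if s.2 ≤ ab.1 - 1 then s.1 ++ [(s.2, ab.1 - 1)] else s.1), ab.2 + 1)

def unseen_intervals_py_alt (frame_count : Int) (seen_frames : List Int) : List (Int × Int) :=
  if frame_count ≤ 0 then []
  else
    let seen := PySem.List.sorted
      (PySem.Set.ofList (seen_frames.filter (fun i => decide (0 ≤ i) && decide (i < frame_count))))
      (fun x => x) false
    let st := (pvMergeRuns seen).foldl pvCstep ([], 0)
    if st.2 ≤ frame_count - 1 then st.1 ++ [(st.2, frame_count - 1)] else st.1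

-- ===== PRECONDITION & SPEC =====
def Spec_unseen_intervals_py (frame_count : Int) (seen_frames : List Int) (out : List (Int × Int)) : Prop := out = unseen_intervals_py_alt frame_count seen_frames
instance (frame_count : Int) (seen_frames : List Int) (out : List (Int × Int)) : Decidable (Spec_unseen_intervals_py frame_count seen_frames out) := by unfold Spec_unseen_intervals_py; infer_instance

-- ===== CLAIM (what is proved, stated in full; the proofs are below) =====
def Claim_equal_unseen_intervals_py : Prop := ∀ (frame_count : Int) (seen_frames : List Int), Dom_unseen_intervals_py frame_count seen_frames → Spec_unseen_intervals_py frame_count seen_frames (unseen_intervals_py frame_count seen_frames)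

-- ===== LEMMAS AND PROOFS =====

-- canonical gap list of a strictly increasing anchor list, used by both directions
def pvGaps (prev : Int) (l : List Int) (fc : Int) : List (Int × Int) :=
  match l with
  | [] => if prev + 1 ≤ fc - 1 then [(prev + 1, fc - 1)] else []
  | x :: xs => (if prev + 1 ≤ x - 1 then [(prev + 1, x - 1)] else []) ++ pvGaps x xs fc

-- A's fold over adjacent anchor pairs computes pvGaps
theorem pvA_fold (l : List Int) (fc : Int) : ∀ (prev : Int) (acc : List (Int × Int)),
    (((prev :: (l ++ [fc])).zip (l ++ [fc])).foldl pvAstep acc) = acc ++ pvGaps prev l fc := by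
  induction l with
  | nil =>
    intro prev acc
    simp [pvGaps, pvAstep]
    split <;> simp
  | cons x xs ih =>
    intro prev acc
    simp only [List.cons_append, List.zip_cons_cons, List.foldl_cons, pvGaps]
    rw [ih x]
    simp [pvAstep]
    split <;> simp

-- the gaps inside one consecutive run are empty
theorem pvGaps_runEnd (fc : Int) (xs : List Int) : ∀ (cur : Int),
    pvGaps cur xs fc = pvGaps (pvRunEnd cur xs).1 (pvRunEnd cur xs).2 fc := by
  induction xs with
  | nil => intro cur; rfl
  | cons y ys ih =>
    intro cur
    by_cases hy : y = cur + 1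
    · simp only [pvRunEnd, if_pos hy, pvGaps]
      rw [if_neg (by omega : ¬ cur + 1 ≤ y - 1)]
      simpa using ih y
    · simp [pvRunEnd, if_neg hy]

-- main B invariant: phase 2 over the merged blocks of l, from cursor c, emits pvGaps (c-1) l fc
theorem pvC_main (fc : Int) : ∀ (n : Nat) (l : List Int), l.length ≤ n →
    ∀ (acc : List (Int × Int)) (c : Int),
    (let st := (pvMergeRuns l).foldl pvCstep (acc, c);
      if st.2 ≤ fc - 1 then st.1 ++ [(st.2, fc - 1)] else st.1) = acc ++ pvGaps (c - 1) l fc := by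
  intro n
  induction n with
  | zero =>
    intro l hl acc c
    rw [List.length_eq_zero_iff.1 (Nat.le_zero.1 hl)]
    simp only [pvMergeRuns, List.foldl_nil, pvGaps]
    rw [show c - 1 + 1 = c by omega]
    split <;> simp <;> omega
  | succ n ih =>
    intro l hl acc c
    match l with
    | [] =>
      simp only [pvMergeRuns, List.foldl_nil, pvGaps]
      rw [show c - 1 + 1 = c by omega]
      split <;> simp <;> omega
    | x :: xs =>
      simp only [pvMergeRuns, List.foldl_cons]
      have hrest : (pvRunEnd x xs).2.length ≤ n := by
        have := pvRunEnd_length x xs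
        simp at hl
        omega
      have ihr := ih (pvRunEnd x xs).2 hrest
      simp only [pvGaps, pvGaps_runEnd fc xs x]
      by_cases hcx : c ≤ x - 1
      · simp only [pvCstep, if_pos hcx]
        rw [ihr (acc ++ [(c, x - 1)]) ((pvRunEnd x xs).1 + 1),
            show (pvRunEnd x xs).1 + 1 - 1 = (pvRunEnd x xs).1 by omega,
            if_pos (by omega : c - 1 + 1 ≤ x - 1), show c - 1 + 1 = c by omega]
        simp
      · simp only [pvCstep, if_neg hcx]
        rw [ihr acc ((pvRunEnd x xs).1 + 1),
            show (pvRunEnd x xs).1 + 1 - 1 = (pvRunEnd x xs).1 by omega,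
            if_neg (by omega : ¬ c - 1 + 1 ≤ x - 1)]
        simp

-- ===== VERDICT (by name: the statement is the Claim_ definition above) =====
theorem unseen_intervals_py_spec : Claim_equal_unseen_intervals_py := by
  intro fc sf _
  unfold Spec_unseen_intervals_py unseen_intervals_py unseen_intervals_py_alt
  by_cases h : fc ≤ 0
  · simp [h]
  · simp only [if_neg h, List.tail_cons]
    set seen := PySem.List.sorted
      (PySem.Set.ofList (sf.filter (fun i => decide (0 ≤ i) && decide (i < fc))))
      (fun x => x) false with hseen
    have hA := pvA_fold seen fc (-1) []
    simp only [List.nil_append] at hA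
    have hB := pvC_main fc seen.length seen le_rfl [] 0
    simp only [List.nil_append, show (0 : Int) - 1 = -1 from rfl] at hB
    rw [hA, ← hB]
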